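-- pv_equiv track=rewrite | github.com/mixmikmic/Unpopular_GH_analysis | python/8266_109607_problems_4.py | compare_leaves
-- ===== SOURCE A (Python) =====
-- def compare_leaves(leaves):
--     if len(leaves[0]) > len(leaves[1]):
--         for i in range(len(leaves[0])):
--             l1 = leaves[0][i]
--             if i > len(leaves[1])-1:
--                 l2 = None
--             else:
--                 l2 = leaves[1][i]
--             if not l1 == l2:
--                 return (l1,l2)
--     else:
--         for i in range(len(leaves[1])):
--             l2 = leaves[1][i]
--             if i > len(leaves[0])-1:
--                 l1 = None
--             else:
--                 l1 = leaves[0][i]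
--             if not l1 == l2:
--                 return (l1,l2)
--
--     return (None, None)
-- ===== SOURCE B (Python) =====
-- def compare_leaves(leaves):
--     a, b = leaves[0], leaves[1]
--     n = min(len(a), len(b))
--     # binary search for the longest m <= n with a[:m] == b[:m]
--     lo, hi = 0, n
--     while lo < hi:
--         mid = (lo + hi + 1) // 2
--         if a[:mid] == b[:mid]:
--             lo = mid
--         else:
--             hi = mid - 1
--     k = lo
--     if k < n:
--         return (a[k], b[k])
--     if len(a) > n:
--         return (a[n], None)
--     if len(b) > n:
--         return (None, b[n])
--     return (None, None)
-- ===== Notes on version B (the rewrite author's own statement) =====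
-- stated objective: alternative
-- what changed: Replaces A's element-by-element padded scan with a binary search for the longest common prefix length using bulk slice comparisons, then a constant-time readout at that index.
import Mathlib
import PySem

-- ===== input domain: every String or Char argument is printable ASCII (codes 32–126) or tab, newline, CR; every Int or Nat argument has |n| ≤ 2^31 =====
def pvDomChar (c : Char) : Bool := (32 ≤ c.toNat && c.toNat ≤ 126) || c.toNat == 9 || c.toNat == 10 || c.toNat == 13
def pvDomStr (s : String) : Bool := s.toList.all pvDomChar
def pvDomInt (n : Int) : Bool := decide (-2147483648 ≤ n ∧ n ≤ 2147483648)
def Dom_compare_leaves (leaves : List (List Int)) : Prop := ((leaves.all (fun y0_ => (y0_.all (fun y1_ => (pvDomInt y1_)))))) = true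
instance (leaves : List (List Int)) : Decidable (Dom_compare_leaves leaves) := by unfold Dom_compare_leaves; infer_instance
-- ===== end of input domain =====

-- B replaces A's element-by-element padded scan by a binary search for the longest
-- common prefix length (bulk slice comparisons) plus a constant-time readout
-- (objective: alternative algorithm; not claimed faster).

-- ===== PORT A =====
-- for i in range(len(l0)): l1 = l0[i]; l2 = None if i > len(l1)-1 else l1[i]; early return on mismatch
-- (inside the loop i < len l0, so l0[i] cannot raise; List.getD is exact there)
def aLoopGt (l0 l1 : List Int) (i fuel : Nat) : Option Int × Option Int :=
  match fuel with
  | 0 => (none, none)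
  | f + 1 =>
    let v1 := l0.getD i 0
    let v2 : Option Int := if (i : Int) > (l1.length : Int) - 1 then none else some (l1.getD i 0)
    if ¬ (some v1 = v2) then (some v1, v2) else aLoopGt l0 l1 (i + 1) f

-- the else-branch loop, symmetric
def aLoopLe (l0 l1 : List Int) (i fuel : Nat) : Option Int × Option Int :=
  match fuel with
  | 0 => (none, none)
  | f + 1 =>
    let v2 := l1.getD i 0
    let v1 : Option Int := if (i : Int) > (l0.length : Int) - 1 then none else some (l0.getD i 0)
    if ¬ (v1 = some v2) then (v1, some v2) else aLoopLe l0 l1 (i + 1) f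

def compare_leaves (leaves : List (List Int)) : Option Int × Option Int :=
  match leaves with
  | l0 :: l1 :: _ =>
    if l0.length > l1.length then aLoopGt l0 l1 0 l0.length
    else aLoopLe l0 l1 0 l1.length
  | _ => (none, none)  -- Python raises IndexError here; excluded by Pre_

-- ===== PORT B =====
-- Source B's while-loop: binary search for the longest m ≤ hi with a[:m] == b[:m];
-- terminates because hi - lo strictly decreases each iteration
def bs (a b : List Int) (lo hi : Nat) : Nat :=
  if _h : lo < hi then
    let mid := (lo + hi + 1) / 2
    if a.take mid == b.take mid then bs a b mid hi
    else bs a b lo (mid - 1)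
  else lo
termination_by hi - lo
decreasing_by
  · omega
  · omega

def compare_leaves_alt (leaves : List (List Int)) : Option Int × Option Int :=
  -- leaves[0] / leaves[1]: Python raises IndexError on fewer than two lists; excluded by Pre_
  match PySem.List.pyGet? leaves 0, PySem.List.pyGet? leaves 1 with
  | some a, some b =>
    let n := min a.length b.length
    let k := bs a b 0 n
    -- k < n implies k is a valid index of both lists, so getD is exact for a[k]/b[k]
    if k < n then (some (a.getD k 0), some (b.getD k 0))
    else if a.length > n then (some (a.getD n 0), none)
    else if b.length > n then (none, some (b.getD n 0))
    else (none, none)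
  | _, _ => (none, none)

-- ===== PRECONDITION & SPEC =====
-- A evaluates leaves[0] and leaves[1]: it raises IndexError with fewer than two lists.
def Pre_compare_leaves (leaves : List (List Int)) : Prop := 2 ≤ leaves.length
instance (leaves : List (List Int)) : Decidable (Pre_compare_leaves leaves) := by unfold Pre_compare_leaves; infer_instance
def pvWitness_compare_leaves : List (List Int) := [[1, 2], [1, 3]]

def Spec_compare_leaves (leaves : List (List Int)) (out : Option Int × Option Int) : Prop := out = compare_leaves_alt leaves
instance (leaves : List (List Int)) (out : Option Int × Option Int) : Decidable (Spec_compare_leaves leaves out) := by unfold Spec_compare_leaves; infer_instance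

-- ===== CLAIM (what is proved, stated in full; the proofs are below) =====
def Claim_equal_compare_leaves : Prop := ∀ (leaves : List (List Int)), Dom_compare_leaves leaves → Pre_compare_leaves leaves → Spec_compare_leaves leaves (compare_leaves leaves)

-- ===== LEMMAS AND PROOFS =====

-- common reference function: first mismatching pair of the None-padded zip
def padDiff : List Int → List Int → Option Int × Option Int
  | [], [] => (none, none)
  | x :: _, [] => (some x, none)
  | [], y :: _ => (none, some y)
  | x :: xs, y :: ys => if x = y then padDiff xs ys else (some x, some y)

-- length of the common prefix
def cpl : List Int → List Int → Nat
  | x :: xs, y :: ys => if x = y then cpl xs ys + 1 else 0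
  | _, _ => 0

theorem cpl_le : ∀ (a b : List Int), cpl a b ≤ min a.length b.length := by
  intro a
  induction a with
  | nil => intro b; simp [cpl]
  | cons x xs ih =>
    intro b
    cases b with
    | nil => simp [cpl]
    | cons y ys =>
      by_cases h : x = y
      · have := ih ys
        simp [cpl, h]; omega
      · simp [cpl, h]

theorem take_eq_iff : ∀ (a b : List Int) (m : Nat), m ≤ min a.length b.length →
    (a.take m = b.take m ↔ m ≤ cpl a b) := by
  intro a
  induction a with
  | nil => intro b m hm; simp at hm; simp [hm]
  | cons x xs ih =>
    intro b m hm
    cases b with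
    | nil => simp at hm; simp [hm]
    | cons y ys =>
      cases m with
      | zero => simp
      | succ m' =>
        simp only [List.length_cons, Nat.succ_le_succ_iff, le_min_iff] at hm
        by_cases h : x = y
        · have := ih ys m' (by omega)
          simp [List.take_succ_cons, cpl, h, this]
        · rw [show cpl (x :: xs) (y :: ys) = 0 from by simp [cpl, h]]
          simp only [List.take_succ_cons]
          constructor
          · intro he
            exact absurd (List.cons_eq_cons.mp he).1 h
          · omega

theorem bs_eq (a b : List Int) : ∀ (d lo hi : Nat), hi - lo ≤ d →
    lo ≤ cpl a b → cpl a b ≤ hi → hi ≤ min a.length b.length →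
    bs a b lo hi = cpl a b := by
  intro d
  induction d with
  | zero =>
    intro lo hi hd h1 h2 h3
    have : ¬ lo < hi := by omega
    rw [bs, dif_neg this]; omega
  | succ d ih =>
    intro lo hi hd h1 h2 h3
    by_cases hlt : lo < hi
    · rw [bs, dif_pos hlt]
      have hmid1 : lo < (lo + hi + 1) / 2 := by omega
      have hmid2 : (lo + hi + 1) / 2 ≤ hi := by omega
      by_cases hp : a.take ((lo + hi + 1) / 2) = b.take ((lo + hi + 1) / 2)
      · have hk : (lo + hi + 1) / 2 ≤ cpl a b :=
          (take_eq_iff a b _ (by omega)).mp hp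
        simp only [beq_iff_eq, hp, if_true]
        exact ih _ hi (by omega) hk h2 h3
      · have hk : ¬ ((lo + hi + 1) / 2 ≤ cpl a b) := fun hle =>
          hp ((take_eq_iff a b _ (by omega)).mpr hle)
        simp only [beq_iff_eq, hp, if_false]
        exact ih lo _ (by omega) h1 (by omega) (by omega)
    · rw [bs, dif_neg hlt]; omega

-- characterise padDiff by the common prefix length
theorem padDiff_char : ∀ (a b : List Int),
    padDiff a b =
      (if cpl a b < min a.length b.length then
        (some (a.getD (cpl a b) 0), some (b.getD (cpl a b) 0))
      else if a.length > min a.length b.length then (some (a.getD (min a.length b.length) 0), none)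
      else if b.length > min a.length b.length then (none, some (b.getD (min a.length b.length) 0))
      else (none, none)) := by
  intro a
  induction a with
  | nil =>
    intro b
    cases b with
    | nil => rfl
    | cons y ys => simp [padDiff, cpl, List.getD]
  | cons x xs ih =>
    intro b
    cases b with
    | nil => simp [padDiff, cpl, List.getD]
    | cons y ys =>
      by_cases h : x = y
      · have := ih ys
        have hle := cpl_le xs ys
        simp only [padDiff, h, if_true, cpl, List.length_cons]
        rw [this]
        have hmin : min (xs.length + 1) (ys.length + 1) = min xs.length ys.length + 1 := by omega
        rw [hmin]
        by_cases hlt : cpl xs ys < min xs.length ys.length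
        · have hlt' : cpl xs ys + 1 < min xs.length ys.length + 1 := by omega
          rw [if_pos hlt, if_pos hlt']
          simp [List.getD]
        · have hlt' : ¬ (cpl xs ys + 1 < min xs.length ys.length + 1) := by omega
          rw [if_neg hlt, if_neg hlt']
          by_cases h0 : xs.length > min xs.length ys.length
          · have h0' : xs.length + 1 > min xs.length ys.length + 1 := by omega
            rw [if_pos h0, if_pos h0']
            simp [List.getD]
          · have h0' : ¬ (xs.length + 1 > min xs.length ys.length + 1) := by omega
            rw [if_neg h0, if_neg h0']
            by_cases h1 : ys.length > min xs.length ys.length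
            · have h1' : ys.length + 1 > min xs.length ys.length + 1 := by omega
              rw [if_pos h1, if_pos h1']
              simp [List.getD]
            · have h1' : ¬ (ys.length + 1 > min xs.length ys.length + 1) := by omega
              rw [if_neg h1, if_neg h1']
      · simp only [padDiff, h, if_false, cpl, List.length_cons]
        rw [if_pos (by omega)]
        simp [List.getD]

theorem alt_eq_padDiff (a b : List Int) (rest : List (List Int)) :
    compare_leaves_alt (a :: b :: rest) = padDiff a b := by
  have hbs : bs a b 0 (min a.length b.length) = cpl a b :=
    bs_eq a b (min a.length b.length) 0 (min a.length b.length)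
      (by omega) (Nat.zero_le _) (cpl_le a b) le_rfl
  have h0 : PySem.List.pyGet? (a :: b :: rest) 0 = some a := by
    have hh : (0 : Int) ≤ (rest.length : Int) + 1 := by positivity
    simp [PySem.List.pyGet?, PySem.List.pyIdx?, hh]
  have h1 : PySem.List.pyGet? (a :: b :: rest) 1 = some b := by
    simp [PySem.List.pyGet?, PySem.List.pyIdx?]
  simp only [compare_leaves_alt, h0, h1, hbs]
  exact (padDiff_char a b).symm

theorem aLoopGt_eq_padDiff (l0 l1 : List Int) :
    ∀ (fuel i : Nat), l1.length < l0.length → fuel = l0.length - i → i ≤ l0.length →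
      aLoopGt l0 l1 i fuel = padDiff (l0.drop i) (l1.drop i) := by
  intro fuel
  induction fuel with
  | zero =>
    intro i hlt hf hi
    have h0 : i = l0.length := by omega
    have h1 : l1.length ≤ i := by omega
    rw [List.drop_of_length_le (le_of_eq h0.symm), List.drop_of_length_le h1]
    rfl
  | succ f ih =>
    intro i hlt hf hi
    have hi0 : i < l0.length := by omega
    have hd0 : l0.drop i = l0[i] :: l0.drop (i + 1) := List.drop_eq_getElem_cons hi0
    have hg0 : l0.getD i 0 = l0[i] := by
      simp [List.getD, List.getElem?_eq_getElem hi0]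
    by_cases hlen : i < l1.length
    · have hd1 : l1.drop i = l1[i] :: l1.drop (i + 1) := List.drop_eq_getElem_cons hlen
      have hg1 : l1.getD i 0 = l1[i] := by
        simp [List.getD, List.getElem?_eq_getElem hlen]
      have hcond : ¬ ((i : Int) > (l1.length : Int) - 1) := by omega
      rw [hd0, hd1]
      simp only [aLoopGt, hcond, if_false, hg0, hg1, padDiff]
      by_cases hxy : l0[i] = l1[i]
      · simp [hxy, ih (i + 1) hlt (by omega) (by omega)]
      · simp [hxy]
    · have h1 : l1.length ≤ i := by omega
      have hd1 : l1.drop i = [] := List.drop_of_length_le h1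
      have hcond : (i : Int) > (l1.length : Int) - 1 := by omega
      rw [hd0, hd1]
      simp [aLoopGt, hcond, padDiff, List.getD, List.getElem?_eq_getElem hi0]

theorem aLoopLe_eq_padDiff (l0 l1 : List Int) :
    ∀ (fuel i : Nat), l0.length ≤ l1.length → fuel = l1.length - i → i ≤ l1.length →
      aLoopLe l0 l1 i fuel = padDiff (l0.drop i) (l1.drop i) := by
  intro fuel
  induction fuel with
  | zero =>
    intro i hle hf hi
    have h1 : i = l1.length := by omega
    have h0 : l0.length ≤ i := by omega
    rw [List.drop_of_length_le h0, List.drop_of_length_le (le_of_eq h1.symm)]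
    rfl
  | succ f ih =>
    intro i hle hf hi
    have hi1 : i < l1.length := by omega
    have hd1 : l1.drop i = l1[i] :: l1.drop (i + 1) := List.drop_eq_getElem_cons hi1
    have hg1 : l1.getD i 0 = l1[i] := by
      simp [List.getD, List.getElem?_eq_getElem hi1]
    by_cases hlen : i < l0.length
    · have hd0 : l0.drop i = l0[i] :: l0.drop (i + 1) := List.drop_eq_getElem_cons hlen
      have hg0 : l0.getD i 0 = l0[i] := by
        simp [List.getD, List.getElem?_eq_getElem hlen]
      have hcond : ¬ ((i : Int) > (l0.length : Int) - 1) := by omega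
      rw [hd0, hd1]
      simp only [aLoopLe, hcond, if_false, hg0, hg1, padDiff]
      by_cases hxy : l0[i] = l1[i]
      · simp [hxy, ih (i + 1) hle (by omega) (by omega)]
      · simp [hxy]
    · have h0 : l0.length ≤ i := by omega
      have hd0 : l0.drop i = [] := List.drop_of_length_le h0
      have hcond : (i : Int) > (l0.length : Int) - 1 := by omega
      rw [hd0, hd1]
      simp [aLoopLe, hcond, padDiff, List.getD, List.getElem?_eq_getElem hi1]

theorem compare_leaves_eq (leaves : List (List Int)) (h : 2 ≤ leaves.length) :
    compare_leaves leaves = compare_leaves_alt leaves := by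
  match leaves with
  | [] => simp at h
  | [_] => simp at h
  | l0 :: l1 :: rest =>
    show (if l0.length > l1.length then aLoopGt l0 l1 0 l0.length
          else aLoopLe l0 l1 0 l1.length) = compare_leaves_alt (l0 :: l1 :: rest)
    rw [alt_eq_padDiff]
    by_cases hlen : l0.length > l1.length
    · rw [if_pos hlen, aLoopGt_eq_padDiff l0 l1 l0.length 0 hlen (by omega) (by omega)]
      simp
    · rw [if_neg hlen, aLoopLe_eq_padDiff l0 l1 l1.length 0 (by omega) (by omega) (by omega)]
      simp

-- ===== VERDICT (by name: the statement is the Claim_ definition above) =====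
theorem compare_leaves_spec : Claim_equal_compare_leaves := by
  intro leaves _ hpre
  exact compare_leaves_eq leaves hpre
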